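-- pv_equiv track=rewrite | github.com/EnderBro1000/TSA-code-challenges | district/cube_shortest_path.py | createOppCases
-- ===== SOURCE A (Python) =====
-- def rotateCoords(coords, direction):
--     return [-coords[1] * direction, coords[0] * direction]
--
-- def rotateCoordsAmountDirection(coords, amount, direction):
--     for i in range(amount):
--         coords = rotateCoords(coords, direction)
--     return coords
--
-- def rotateCoordsAmount(coords, amount):
--     if amount == 0:
--         return coords
--     direction = amount//abs(amount)
--     return rotateCoordsAmountDirection(coords, abs(amount), direction)
--
-- def createOppCases(relativeCoords, sideLength):
--     cases = [0, 0, 0, 0]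
--     sign = 1
--     for i in range(4):
--         temp = relativeCoords.copy()
--         temp = rotateCoordsAmount(temp, -i*2)
--         if i > 1:
--             sign = -1
--         temp[i%2] += sideLength * 2 * sign
--
--         cases[i] = temp
--     return cases
-- ===== SOURCE B (Python) =====
-- def createOppCases(relativeCoords, sideLength):
--     # Closed form: -2i quarter-turns is identity for even i and a 180-degree
--     # negation for odd i; offset axis is i%2, offset sign flips at i=2.
--     x, y = relativeCoords[0], relativeCoords[1]
--     d = sideLength * 2
--     return [
--         [x + d] + relativeCoords[1:],
--         [-x, -y + d],
--         [x - d, y],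
--         [-x, -y - d],
--     ]
-- ===== Notes on version B (the rewrite author's own statement) =====
-- stated objective: simpler
-- what changed: Replaced the rotation helpers and the range(4) loop with the closed form (-2i quarter-turns = identity for even i, 180-degree negation for odd i), returning the four case lists as one literal.
import Mathlib
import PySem

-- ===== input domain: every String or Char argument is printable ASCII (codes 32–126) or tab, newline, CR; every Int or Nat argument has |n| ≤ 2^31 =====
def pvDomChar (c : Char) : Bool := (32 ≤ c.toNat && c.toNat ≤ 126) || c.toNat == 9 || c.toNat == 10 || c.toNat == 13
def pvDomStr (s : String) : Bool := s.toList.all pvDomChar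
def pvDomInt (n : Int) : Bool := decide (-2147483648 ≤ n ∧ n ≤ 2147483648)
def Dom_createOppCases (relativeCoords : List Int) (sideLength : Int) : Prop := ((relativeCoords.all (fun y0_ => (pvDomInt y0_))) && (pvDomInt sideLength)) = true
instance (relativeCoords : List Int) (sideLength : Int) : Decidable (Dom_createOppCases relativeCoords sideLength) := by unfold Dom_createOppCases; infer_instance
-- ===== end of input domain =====

-- B replaces A's rotation helpers and loop by the closed form of the four cases (simpler).
-- Pre_ requires length ≥ 2: on shorter lists both A and B raise IndexError.

-- ===== PORT A =====
def rotateCoords (coords : List Int) (direction : Int) : List Int :=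
  [-(PySem.List.pyGetD coords 1 0) * direction, (PySem.List.pyGetD coords 0 0) * direction]

def rotateCoordsAmountDirection (coords : List Int) (amount : Int) (direction : Int) : List Int :=
  (PySem.List.pyRange 0 amount 1).foldl (fun c _ => rotateCoords c direction) coords

def rotateCoordsAmount (coords : List Int) (amount : Int) : List Int :=
  if amount = 0 then coords
  else rotateCoordsAmountDirection coords |amount| (PySem.Int.floordiv amount |amount|)

def createOppCases (relativeCoords : List Int) (sideLength : Int) : List (List Int) :=
  -- cases = [0,0,0,0]: the int placeholders are all overwritten; typed as empty-list slots
  let st := (PySem.List.pyRange 0 4 1).foldl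
    (fun (st : List (List Int) × Int) i =>
      let cases := st.1
      let sign := st.2
      let temp := relativeCoords
      let temp := rotateCoordsAmount temp (-i * 2)
      let sign := if i > 1 then -1 else sign
      let idx := PySem.Int.mod i 2
      let temp := PySem.List.pySetD temp idx (PySem.List.pyGetD temp idx 0 + sideLength * 2 * sign)
      (PySem.List.pySetD cases i temp, sign))
    ([[], [], [], []], 1)
  st.1

-- ===== PORT B =====
def createOppCases_alt (relativeCoords : List Int) (sideLength : Int) : List (List Int) :=
  let x := PySem.List.pyGetD relativeCoords 0 0
  let y := PySem.List.pyGetD relativeCoords 1 0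
  let d := sideLength * 2
  [ (x + d) :: PySem.List.slice relativeCoords (some 1) none,
    [-x, -y + d],
    [x - d, y],
    [-x, -y - d] ]

-- ===== PRECONDITION & SPEC =====
-- Pre_: on lists shorter than 2 the Python A raises IndexError (so does B).
def Pre_createOppCases (relativeCoords : List Int) (sideLength : Int) : Prop :=
  2 ≤ relativeCoords.length
instance (relativeCoords : List Int) (sideLength : Int) : Decidable (Pre_createOppCases relativeCoords sideLength) := by unfold Pre_createOppCases; infer_instance
def pvWitness_createOppCases : List Int × Int := ([3, 5], 10)

def Spec_createOppCases (relativeCoords : List Int) (sideLength : Int) (out : List (List Int)) : Prop := out = createOppCases_alt relativeCoords sideLength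
instance (relativeCoords : List Int) (sideLength : Int) (out : List (List Int)) : Decidable (Spec_createOppCases relativeCoords sideLength out) := by unfold Spec_createOppCases; infer_instance

-- ===== CLAIM (what is proved, stated in full; the proofs are below) =====
def Claim_equal_createOppCases : Prop := ∀ (relativeCoords : List Int) (sideLength : Int), Dom_createOppCases relativeCoords sideLength → Pre_createOppCases relativeCoords sideLength → Spec_createOppCases relativeCoords sideLength (createOppCases relativeCoords sideLength)

-- ===== LEMMAS AND PROOFS =====

-- ===== VERDICT (by name: the statement is the Claim_ definition above) =====
theorem createOppCases_spec : Claim_equal_createOppCases := by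
  intro rc L _ hpre
  unfold Pre_createOppCases at hpre
  match rc with
  | x :: y :: t =>
    show createOppCases (x :: y :: t) L = createOppCases_alt (x :: y :: t) L
    simp [createOppCases, createOppCases_alt, rotateCoordsAmount,
      rotateCoordsAmountDirection, rotateCoords, PySem.List.pyRange,
      PySem.Int.mod, PySem.Int.floordiv,
      PySem.List.pyGetD, PySem.List.pyGet?, PySem.List.pyIdx?,
      PySem.List.pySetD, PySem.List.pySet?, PySem.List.slice, List.range_succ]
    split_ifs with h
    · simp
      ring_nf
      exact ⟨trivial, trivial⟩
    · omega
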